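-- pv_equiv track=rewrite | github.com/KennyCheung-Dev/PythonClassContent | Python1Algo/1-16/NestedLoopList.py | iconScale
-- ===== SOURCE A (Python) =====
-- def iconScale(k):
--     icon = [["*", "x", "*"],
--             [" ", "x", "x"],
--             ["*", " ", "*"]]
--     result = ""
--     for lines in range(3): # For each line
--         for l in range(k):
--             for item in range(3): # for each item in a line
--                 result += icon[lines][item] * k
--             result += "\n"
--
--     return result
-- ===== SOURCE B (Python) =====
-- def iconScale(k):
--     icon = [["*", "x", "*"],
--             [" ", "x", "x"],
--             ["*", " ", "*"]]
--     # coordinate addressing: the character at column j of physical row i is icon[i // k][j // k];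
--     # build the three distinct physical rows by scanning columns, then pick row i // k for each i
--     rows = ["".join(icon[r][j // k] for j in range(3 * k)) + "\n" for r in range(3)]
--     return "".join(rows[i // k] for i in range(3 * k))
-- ===== Notes on version B (the rewrite author's own statement) =====
-- stated objective: alternative
-- what changed: Replaces A's triple-nested repetition rebuild (rows x vertical repeats x per-cell string multiplication) by coordinate addressing: each output character is icon[i // k][j // k], computed by one column scan per distinct row and a row lookup rows[i // k] per physical row.
import Mathlib
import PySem

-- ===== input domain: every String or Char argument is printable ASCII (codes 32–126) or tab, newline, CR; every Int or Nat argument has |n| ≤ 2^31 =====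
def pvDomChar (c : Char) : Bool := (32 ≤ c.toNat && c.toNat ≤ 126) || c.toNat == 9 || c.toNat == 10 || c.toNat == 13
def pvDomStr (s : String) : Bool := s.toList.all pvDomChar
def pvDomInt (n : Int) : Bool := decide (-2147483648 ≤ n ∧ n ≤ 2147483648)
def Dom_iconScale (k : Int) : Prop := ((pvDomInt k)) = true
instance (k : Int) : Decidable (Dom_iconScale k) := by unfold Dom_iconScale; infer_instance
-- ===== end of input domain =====

-- B builds the icon by coordinate addressing — the character at column j of physical row i is
-- icon[i // k][j // k]: it scans the columns once per distinct row and picks row i // k for each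
-- physical row — instead of A's triple-nested repetition rebuild (objective: alternative).

-- Python's `s * k` on strings (empty for k ≤ 0), used by port A.
def pvStrMul (s : String) (k : Int) : String :=
  String.ofList (PySem.List.pyRepeat s.toList k)
-- ===== PORT A =====
def iconScale (k : Int) : String :=
  let icon : List (List String) :=
    [["*", "x", "*"],[" ", "x", "x"],["*", " ", "*"]]
  (PySem.List.pyRange 0 3 1).foldl (fun result lines =>
    (PySem.List.pyRange 0 k 1).foldl (fun result _l =>
      ((PySem.List.pyRange 0 3 1).foldl (fun result item =>
        result ++ pvStrMul (PySem.List.pyGetD (PySem.List.pyGetD icon lines []) item "") k)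
        result) ++ "\n")
      result)
    ""

-- ===== PORT B =====
def iconScale_alt (k : Int) : String :=
  let icon : List (List String) :=
    [["*", "x", "*"],[" ", "x", "x"],["*", " ", "*"]]
  let rows : List String :=
    (PySem.List.pyRange 0 3 1).map (fun r =>
      PySem.Str.join "" ((PySem.List.pyRange 0 (3 * k) 1).map (fun j =>
        PySem.List.pyGetD (PySem.List.pyGetD icon r []) (PySem.Int.floordiv j k) "")) ++ "\n")
  PySem.Str.join "" ((PySem.List.pyRange 0 (3 * k) 1).map (fun i =>
    PySem.List.pyGetD rows (PySem.Int.floordiv i k) ""))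


-- ===== PRECONDITION & SPEC =====
def Spec_iconScale (k : Int) (out : String) : Prop := out = iconScale_alt k
instance (k : Int) (out : String) : Decidable (Spec_iconScale k out) := by unfold Spec_iconScale; infer_instance

-- ===== CLAIM (what is proved, stated in full; the proofs are below) =====
def Claim_equal_iconScale : Prop := ∀ (k : Int), Dom_iconScale k → Spec_iconScale k (iconScale k)

-- ===== LEMMAS AND PROOFS =====

theorem pv_flatMap_range_mul_div {α : Type} (n : Nat) (g : Nat → List α) (m : Nat) :
    (List.range (m*n)).flatMap (fun j => g (j / n)) =
      (List.range m).flatMap (fun r => (List.replicate n (g r)).flatten) := by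
  rcases Nat.eq_zero_or_pos n with hn | hn
  · subst hn; simp
  induction m with
  | zero => simp
  | succ m ih =>
      have h : (m+1)*n = m*n + n := by ring
      rw [h, List.range_add, List.flatMap_append, ih, List.range_succ, List.flatMap_append]
      congr 1
      rw [List.flatMap_map]
      have : ∀ j ∈ List.range n, g ((m*n + j) / n) = g m := by
        intro j hj
        rw [List.mem_range] at hj
        congr 1
        rw [Nat.add_comm]; rw [Nat.add_mul_div_right _ _ hn, Nat.div_eq_of_lt hj]; omega
      simp only [List.flatMap]
      rw [List.map_congr_left this]
      simp [List.map_const']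

theorem pv_foldl_const_append (s : String) (l : List Int) : ∀ (r : String),
    l.foldl (fun r (_ : Int) => r ++ s) r
      = r ++ String.ofList ((List.replicate l.length s.toList).flatten) := by
  induction l with
  | nil => intro r; apply String.toList_inj.mp; simp
  | cons a t ih =>
      intro r
      simp only [List.foldl_cons, ih]
      apply String.toList_inj.mp
      simp [List.replicate_succ]

theorem pv_flatten_intersperse_nil {α : Type} : ∀ (xs : List (List α)),
    (List.intersperse ([] : List α) xs).flatten = xs.flatten
  | [] => by simp
  | [a] => by simp
  | a :: b :: t => by
      rw [show List.intersperse ([] : List α) (a :: b :: t)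
            = a :: [] :: List.intersperse [] (b :: t) from rfl]
      simp [pv_flatten_intersperse_nil (b :: t)]

theorem pv_join_nil_toList (l : List String) :
    (PySem.Str.join "" l).toList = (l.map String.toList).flatten := by
  rw [PySem.Str.toList_join]
  show PySem.Chars.join [] _ = _
  rw [PySem.Chars.join, List.intercalate, pv_flatten_intersperse_nil]

-- a scan over 3*n positions reading cell p/n of a 3-element table, as a flatMap over the table
theorem pv_chars_join_nil (l : List (List Char)) :
    PySem.Chars.join [] l = l.flatten := by
  rw [PySem.Chars.join, List.intercalate, pv_flatten_intersperse_nil]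

theorem pv_scan_div (n : Nat) (row : List String) :
    ((List.range (3*n)).map (fun p => (row[p/n]?.getD "").toList)).flatten
      = (List.range 3).flatMap (fun r => (List.replicate n ((row[r]?.getD "").toList)).flatten) := by
  rw [← List.flatMap_def]
  exact pv_flatMap_range_mul_div n (fun r => (row[r]?.getD "").toList) 3

theorem iconScale_eq_alt (k : Int) : iconScale k = iconScale_alt k := by
  by_cases hk : k ≤ 0
  · have h1 : PySem.List.pyRange 0 k 1 = [] := PySem.List.pyRange_one_eq_nil hk
    have h2 : PySem.List.pyRange 0 (3*k) 1 = [] := PySem.List.pyRange_one_eq_nil (by omega)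
    have h3 : PySem.List.pyRange 0 3 1 = [0, 1, 2] := by decide
    unfold iconScale iconScale_alt
    simp [h1, h2, h3]
    decide
  · rw [not_le] at hk
    obtain ⟨n, rfl⟩ : ∃ n : Nat, k = (n : Int) := ⟨k.toNat, (Int.toNat_of_nonneg hk.le).symm⟩
    have h3k : (3 : Int) * (n : Int) = ((3*n : Nat) : Int) := by push_cast; ring
    have h3 : PySem.List.pyRange 0 3 1 = [0, 1, 2] := by decide
    have hr3 : List.range 3 = [0, 1, 2] := by decide
    apply String.toList_inj.mp
    have hA : (iconScale (n : Int)).toList =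
        (List.replicate n (List.replicate n '*' ++ List.replicate n 'x' ++ List.replicate n '*' ++ ['\n'])).flatten
        ++ ((List.replicate n (List.replicate n ' ' ++ List.replicate n 'x' ++ List.replicate n 'x' ++ ['\n'])).flatten
        ++ ((List.replicate n (List.replicate n '*' ++ List.replicate n ' ' ++ List.replicate n '*' ++ ['\n'])).flatten)) := by
      have hb : ∀ a b c d : String,
          (fun (r : String) (_ : Int) => r ++ a ++ b ++ c ++ d)
            = (fun (r : String) (_ : Int) => r ++ (a ++ (b ++ (c ++ d)))) := by
        intro a b c d; funext r _; simp [String.append_assoc]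
      unfold iconScale
      simp only [h3, List.foldl_cons, List.foldl_nil]
      simp only [PySem.List.pyGetD]
      norm_num
      rw [hb, hb, hb, pv_foldl_const_append, pv_foldl_const_append, pv_foldl_const_append]
      simp [pvStrMul, PySem.List.pyRepeat, PySem.List.length_pyRange_one, List.append_assoc]
      simp [List.replicate_add, -List.replicate_append_replicate]
    rw [hA]
    unfold iconScale_alt
    rw [h3k, PySem.List.pyRange_zero_natCast, h3]
    rw [pv_join_nil_toList]
    simp only [List.map_map, Function.comp_def, PySem.Int.floordiv_natCast,
      PySem.List.pyGetD_natCast, List.getD_eq_getElem?_getD]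
    rw [pv_scan_div, hr3]
    simp [pv_chars_join_nil, PySem.List.pyGetD]
    simp only [Function.comp_def]
    rw [pv_scan_div, pv_scan_div, pv_scan_div, hr3]
    simp [List.append_assoc]

-- ===== VERDICT (by name: the statement is the Claim_ definition above) =====
theorem iconScale_spec : Claim_equal_iconScale := by
  intro k _
  exact iconScale_eq_alt k
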